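-- pv_equiv track=rewrite | github.com/Anish932-hash/Jarvis-incomplete- | JARVIS_BACKEND/backend/python/inference/coworker_stack_recovery.py | _task_rows_by_name
-- ===== SOURCE A (Python) =====
-- from typing import Any, Callable, Dict, Iterable, List, Optional
--
-- def _task_rows_by_name(task_rows: List[Dict[str, Any]]) -> Dict[str, List[Dict[str, Any]]]:
--     rows: Dict[str, List[Dict[str, Any]]] = {}
--     for item in task_rows:
--         task_name = str(item.get("task", "") or "").strip().lower()
--         if not task_name:
--             continue
--         rows.setdefault(task_name, []).append(item)
--     return rows
-- ===== SOURCE B (Python) =====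
-- from typing import Any, Dict, List
--
-- def _task_rows_by_name(task_rows: List[Dict[str, Any]]) -> Dict[str, List[Dict[str, Any]]]:
--     pairs = [(str(item.get("task", "") or "").strip().lower(), item) for item in task_rows]
--     return {k: [it for k2, it in pairs if k2 == k] for k, _ in pairs if k}
-- ===== Notes on version B (the rewrite author's own statement) =====
-- stated objective: alternative
-- what changed: A accumulates groups in one pass with setdefault/append; B first builds a normalized (key,item) pairs list and then forms each group by a per-key filter in a dict comprehension (first occurrence fixes key order).
import Mathlib
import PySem

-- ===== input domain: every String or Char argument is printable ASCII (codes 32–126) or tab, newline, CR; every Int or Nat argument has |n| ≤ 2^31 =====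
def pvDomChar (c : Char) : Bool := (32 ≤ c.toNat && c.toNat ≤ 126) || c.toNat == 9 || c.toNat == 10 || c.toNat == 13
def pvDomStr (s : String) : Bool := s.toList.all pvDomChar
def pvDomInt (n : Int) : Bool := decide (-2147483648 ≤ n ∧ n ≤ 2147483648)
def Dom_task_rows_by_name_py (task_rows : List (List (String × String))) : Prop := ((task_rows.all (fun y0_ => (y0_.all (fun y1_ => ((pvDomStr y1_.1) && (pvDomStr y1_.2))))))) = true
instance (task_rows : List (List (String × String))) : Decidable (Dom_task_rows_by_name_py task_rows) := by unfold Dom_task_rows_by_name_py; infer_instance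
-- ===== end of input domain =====

-- B replaces A's single-pass setdefault/append accumulation by a pairs list plus a per-key
-- filter comprehension (alternative decomposition, same observable result incl. order).

-- ===== PORT A =====
-- shared normalization: str(item.get("task", "") or "").strip().lower()
-- ('x or ""' on a string is the string itself when nonempty and "" when empty — ported literally)
def pvKey (item : List (String × String)) : String :=
  let v := (PySem.Dict.mk item).getD "task" ""
  let v := if v = "" then "" else v
  PySem.Str.lower (PySem.Str.strip v)

def task_rows_by_name_py (task_rows : List (List (String × String))) : List (String × List (List (String × String))) :=
  (task_rows.foldl
    (fun rows item =>
      let task_name := pvKey item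
      if task_name = "" then rows
      else rows.modify task_name [] (fun l => l ++ [item]))   -- rows.setdefault(task_name, []).append(item)
    PySem.Dict.empty).items

-- ===== PORT B =====
-- the dict comprehension over a fixed pairs list
def pvGroups (pairs : List (String × List (String × String))) : List (String × List (List (String × String))) :=
  (pairs.foldl
    (fun d p =>
      if p.1 = "" then d
      else d.insert p.1 ((pairs.filter (fun q => q.1 == p.1)).map (·.2)))
    PySem.Dict.empty).items

def task_rows_by_name_py_alt (task_rows : List (List (String × String))) : List (String × List (List (String × String))) :=
  pvGroups (task_rows.map (fun item => (pvKey item, item)))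

-- ===== PRECONDITION & SPEC =====
def Spec_task_rows_by_name_py (task_rows : List (List (String × String))) (out : List (String × List (List (String × String)))) : Prop := out = task_rows_by_name_py_alt task_rows
instance (task_rows : List (List (String × String))) (out : List (String × List (List (String × String)))) : Decidable (Spec_task_rows_by_name_py task_rows out) := by unfold Spec_task_rows_by_name_py; infer_instance

-- ===== CLAIM (what is proved, stated in full; the proofs are below) =====
def Claim_equal_task_rows_by_name_py : Prop := ∀ (task_rows : List (List (String × String))), Dom_task_rows_by_name_py task_rows → Spec_task_rows_by_name_py task_rows (task_rows_by_name_py task_rows)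

-- ===== LEMMAS AND PROOFS =====

-- A's guarded modify-loop = modify-loop over the (key,item) pairs of the kept rows
theorem pvA_filter (l : List (List (String × String)))
    (d : PySem.Dict String (List (List (String × String)))) :
    l.foldl
      (fun rows item => if pvKey item = "" then rows
        else rows.modify (pvKey item) [] (fun l => l ++ [item])) d
    = ((l.filter (fun it => !(decide (pvKey it = "")))).map (fun it => (pvKey it, it))).foldl
        (fun d p => d.modify p.1 [] (fun l => l ++ [p.2])) d := by
  induction l generalizing d with
  | nil => rfl
  | cons x xs ih => by_cases h : pvKey x = "" <;> simp [h, ih]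

-- B's guarded insert-loop = insert-loop over the kept pairs
theorem pvB_filter (ps l : List (String × List (String × String)))
    (d : PySem.Dict String (List (List (String × String)))) :
    l.foldl (fun d p => if p.1 = "" then d
      else d.insert p.1 ((ps.filter (fun q => q.1 == p.1)).map (·.2))) d
    = (l.filter (fun p => !(decide (p.1 = "")))).foldl
        (fun d p => d.insert p.1 ((ps.filter (fun q => q.1 == p.1)).map (·.2))) d := by
  induction l generalizing d with
  | nil => rfl
  | cons x xs ih => by_cases h : x.1 = "" <;> simp [h, ih]

-- the nonempty-key pairs of the rows = the pairs of the kept rows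
theorem pvPairs_filter (l : List (List (String × String))) :
    (l.map (fun item => (pvKey item, item))).filter (fun p => !(decide (p.1 = ""))) =
      (l.filter (fun it => !(decide (pvKey it = "")))).map (fun it => (pvKey it, it)) := by
  induction l with
  | nil => rfl
  | cons x xs ih => by_cases h : pvKey x = "" <;> simp [h, ih]

-- insert-fold whose value depends only on the key: getD reads that value when k occurs
theorem pv_getD_foldl_insert_key (ps l : List (String × List (String × String)))
    (d : PySem.Dict String (List (List (String × String)))) (k : String) :
    (l.foldl (fun d p => d.insert p.1 ((ps.filter (fun q => q.1 == p.1)).map (·.2))) d).getD k []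
      = if k ∈ l.map (·.1) then (ps.filter (fun q => q.1 == k)).map (·.2) else d.getD k [] := by
  induction l generalizing d with
  | nil => simp
  | cons x xs ih =>
      simp only [List.foldl_cons, ih, List.map_cons, List.mem_cons]
      by_cases hm : k ∈ xs.map (·.1)
      · simp [hm]
      · by_cases hk : k = x.1
        · simp [hk, PySem.Dict.getD_insert_self]
        · simp [hm, hk,
            PySem.Dict.getD_insert_of_ne d ((ps.filter (fun q => q.1 == x.1)).map (·.2)) [] hk]

set_option maxHeartbeats 1000000 in
theorem task_rows_by_name_py_spec_aux (task_rows : List (List (String × String))) :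
    task_rows_by_name_py task_rows = task_rows_by_name_py_alt task_rows := by
  unfold task_rows_by_name_py task_rows_by_name_py_alt pvGroups
  rw [pvA_filter task_rows PySem.Dict.empty, pvB_filter _ _ PySem.Dict.empty, pvPairs_filter]
  set pairs := task_rows.map (fun item => (pvKey item, item)) with hpairs
  set L := task_rows.filter (fun it => !(decide (pvKey it = ""))) with hL
  set LP := L.map (fun it => (pvKey it, it)) with hLP
  set DA := LP.foldl (fun d p => d.modify p.1 [] (fun l => l ++ [p.2])) PySem.Dict.empty with hDA
  set DB := LP.foldl (fun d p => d.insert p.1 ((pairs.filter (fun q => q.1 == p.1)).map (·.2)))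
      PySem.Dict.empty with hDB
  have hBfilter : pairs.filter (fun p => !(decide (p.1 = ""))) = LP := by
    rw [hpairs, hLP, hL]
    exact pvPairs_filter task_rows
  -- same keys
  have hKA : DA.keys = PySem.Set.update (PySem.Dict.empty (κ := String)
        (ν := List (List (String × String)))).keys (LP.map (·.1)) := by
    rw [hDA]; exact PySem.Dict.keys_foldl_modify_key LP (·.1) [] (fun d p => fun l => l ++ [p.2]) _
  have hKB : DB.keys = PySem.Set.update (PySem.Dict.empty (κ := String)
        (ν := List (List (String × String)))).keys (LP.map (·.1)) := by
    rw [hDB]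
    exact PySem.Dict.keys_foldl_insert_key LP (·.1)
      (fun d p => (pairs.filter (fun q => q.1 == p.1)).map (·.2)) _
  have hkeys : DA.keys = DB.keys := by rw [hKA, hKB]
  have hndA : DA.keys.Nodup := by
    rw [hDA]
    exact PySem.Dict.nodup_keys_foldl_modify_key LP (·.1) [] (fun d p => fun l => l ++ [p.2]) _
      (by simp)
  have hndB : DB.keys.Nodup := hkeys ▸ hndA
  -- every key of DA occurs in LP, hence is a nonempty normalized name
  have hmemLP : ∀ k ∈ DA.keys, k ∈ LP.map (·.1) := by
    intro k hk
    rw [hKA] at hk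
    rcases (PySem.Set.mem_update _ _ _).1 hk with h | h
    · simp [PySem.Dict.keys_empty] at h
    · exact h
  have hmemkey : ∀ k ∈ DA.keys, k ≠ "" := by
    intro k hk
    have hk' := hmemLP k hk
    rw [hLP] at hk'
    simp only [List.map_map, List.mem_map] at hk'
    obtain ⟨it, hit, hke⟩ := hk'
    have hmem : it ∈ L := hit
    rw [hL] at hmem
    have := (List.mem_filter.1 hmem).2
    simp only [Bool.not_eq_true', decide_eq_false_iff_not] at this
    simpa [← hke] using this
  -- same getD at every key of DA
  have hgetD : ∀ k ∈ DA.keys, DA.getD k [] = DB.getD k [] := by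
    intro k hk
    have hkne : k ≠ "" := hmemkey k hk
    have hA' : DA.getD k [] = (LP.filter (fun p => p.1 == k)).map (·.2) := by
      rw [hDA]
      have := PySem.Dict.getD_foldl_modify_append LP
        (PySem.Dict.empty (κ := String) (ν := List (List (String × String)))) k
      simpa using this
    have hB' : DB.getD k [] = (pairs.filter (fun q => q.1 == k)).map (·.2) := by
      rw [hDB, pv_getD_foldl_insert_key pairs LP _ k]
      simp [hmemLP k hk]
    rw [hA', hB']
    have : pairs.filter (fun q => q.1 == k) = LP.filter (fun p => p.1 == k) := by
      rw [← hBfilter, List.filter_filter]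
      apply List.filter_congr
      intro p _
      by_cases h : p.1 = k
      · simp [h, hkne]
      · simp [h]
    rw [this]
  -- conclude: same items
  rw [PySem.Dict.items_eq_map_keys DA hndA [], PySem.Dict.items_eq_map_keys DB hndB [], hkeys]
  apply List.map_congr_left
  intro k hk
  rw [hgetD k (hkeys ▸ hk)]

-- ===== VERDICT (by name: the statement is the Claim_ definition above) =====
theorem task_rows_by_name_py_spec : Claim_equal_task_rows_by_name_py := by
  intro task_rows _
  exact task_rows_by_name_py_spec_aux task_rows
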